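-- pv_equiv track=rewrite | github.com/chakraa1/Data-Structures-and-Algorithms | Arrays/BitsManipulation/MaximumSatisfaction.py | MaximumSatisfaction
-- ===== SOURCE A (Python) =====
-- def MaximumSatisfaction(A):
--     maxSatisfactionvalue=0
--
--     """
--     Goal is to SET most significant bit(i.e. MSB) (for maximizing satisfaction) for at least 4 quantities
--     simultaneously as "a & b & c & d" operation to be performed .
--     If there are k numbers whose MSB is active and remaining n-k numbers in which the bit is zero
--     we can ignore n-k numbers as those are anyway not going to contribute for max statisfaction
--     """
--     commonSetBitIndex=-1
--
--     for i in reversed(range(31)): # why range 31 - because we're ignoring signed bit of 32 bit integer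
--         countActiveMSB=0
--         for k in range(len(A)):
--             if A[k] & (1 << i) > 0:
--                 countActiveMSB += 1
--
--             if countActiveMSB >= 4:
--                 commonSetBitIndex = i
--                 break
--     # Now check if common set bit is on for which quantities i.e. input numbers in the array
--     for element in A:
--         if element & (1 << commonSetBitIndex):
--             maxSatisfactionvalue += 1
--
--     return maxSatisfactionvalue
-- ===== SOURCE B (Python) =====
-- def MaximumSatisfaction(A):
--     # One pass over A builds a per-bit histogram; the lowest bit with count >= 4
--     # (default -1) then drives the same final counting loop as before.
--     counts = [0] * 31
--     for x in A:
--         for i in range(31):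
--             if x & (1 << i) > 0:
--                 counts[i] += 1
--     commonSetBitIndex = -1
--     for i in range(31):
--         if counts[i] >= 4:
--             commonSetBitIndex = i
--             break
--     maxSatisfactionvalue = 0
--     for element in A:
--         if element & (1 << commonSetBitIndex):
--             maxSatisfactionvalue += 1
--     return maxSatisfactionvalue
-- ===== Notes on version B (the rewrite author's own statement) =====
-- stated objective: alternative
-- what changed: B builds a 31-entry per-bit histogram in ONE pass over A and takes the first (lowest) count >= 4 as the index, replacing A's 31 descending per-bit scans with break and last-write-wins index tracking; the final counting loop is kept.
import Mathlib
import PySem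

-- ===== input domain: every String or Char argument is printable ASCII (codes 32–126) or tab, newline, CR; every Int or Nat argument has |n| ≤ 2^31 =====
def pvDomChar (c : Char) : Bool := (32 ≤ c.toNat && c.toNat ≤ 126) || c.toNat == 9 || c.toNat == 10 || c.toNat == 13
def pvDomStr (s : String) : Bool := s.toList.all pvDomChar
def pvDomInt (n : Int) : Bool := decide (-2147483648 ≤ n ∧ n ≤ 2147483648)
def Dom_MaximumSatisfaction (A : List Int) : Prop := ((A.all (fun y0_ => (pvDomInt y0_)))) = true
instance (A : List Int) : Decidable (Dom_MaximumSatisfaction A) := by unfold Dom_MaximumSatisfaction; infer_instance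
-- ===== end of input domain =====

-- B builds the 31 per-bit counts in ONE pass over A and takes the lowest bit whose count
-- reaches 4, replacing A's 31 descending per-bit scans with break and last-write-wins
-- index tracking; the final counting loop is unchanged (alternative decomposition, same cost).

-- Python '1 << idx' (both programs); for idx < 0 Python raises ValueError (excluded by Pre_) — junk 0 there
def pvShl1 (idx : Int) : Int := if 0 ≤ idx then (1:Int) <<< idx.toNat else 0

-- ===== PORT A =====
-- inner loop 'for k in range(len(A)): ...' with its break; on count >= 4 it sets commonSetBitIndex = i
def pvInnerA (i : Nat) (idx : Int) : List Int → Int → Int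
  | [], _count => idx
  | a :: rest, count =>
    let count' := if 0 < PySem.Int.band a ((1:Int) <<< i) then count + 1 else count
    if 4 ≤ count' then (i : Int) else pvInnerA i idx rest count'

def MaximumSatisfaction (A : List Int) : Int :=
  let commonSetBitIndex := ((List.range 31).reverse).foldl (fun idx i => pvInnerA i idx A 0) (-1)
  A.foldl (fun s element => if PySem.Int.band element (pvShl1 commonSetBitIndex) ≠ 0 then s + 1 else s) 0

-- ===== PORT B =====
-- 'for x in A: for i in range(31): if x & (1 << i) > 0: counts[i] += 1'  (i is always in range: getD/set are exact here)
def pvCountsB (A : List Int) : List Int :=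
  A.foldl (fun counts x =>
    (List.range 31).foldl (fun (cs : List Int) (i : Nat) =>
      if 0 < PySem.Int.band x ((1:Int) <<< i) then cs.set i (cs.getD i 0 + 1) else cs) counts)
    (List.replicate 31 0)

-- 'for i in range(31): if counts[i] >= 4: commonSetBitIndex = i; break'  (starting from -1)
def pvFindIdxB (counts : List Int) : List Nat → Int
  | [] => -1
  | i :: rest => if 4 ≤ counts.getD i 0 then (i : Int) else pvFindIdxB counts rest

def MaximumSatisfaction_alt (A : List Int) : Int :=
  let commonSetBitIndex := pvFindIdxB (pvCountsB A) (List.range 31)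
  A.foldl (fun s element => if PySem.Int.band element (pvShl1 commonSetBitIndex) ≠ 0 then s + 1 else s) 0

-- ===== PRECONDITION & SPEC =====
-- Pre_ excludes exactly the inputs on which A raises ValueError (negative shift '1 << -1'):
-- non-empty A in which no bit 0..30 is set in at least 4 elements.
def Pre_MaximumSatisfaction (A : List Int) : Prop :=
  A = [] ∨ ∃ i ∈ List.range 31, 4 ≤ A.countP (fun x => decide (0 < PySem.Int.band x ((1:Int) <<< i)))
instance (A : List Int) : Decidable (Pre_MaximumSatisfaction A) := by unfold Pre_MaximumSatisfaction; infer_instance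

def pvWitness_MaximumSatisfaction : List Int := [15, 15, 15, 15]

def Spec_MaximumSatisfaction (A : List Int) (out : Int) : Prop := out = MaximumSatisfaction_alt A
instance (A : List Int) (out : Int) : Decidable (Spec_MaximumSatisfaction A out) := by unfold Spec_MaximumSatisfaction; infer_instance

-- ===== CLAIM (what is proved, stated in full; the proofs are below) =====
def Claim_equal_MaximumSatisfaction : Prop := ∀ (A : List Int), Dom_MaximumSatisfaction A → Pre_MaximumSatisfaction A → Spec_MaximumSatisfaction A (MaximumSatisfaction A)

-- ===== LEMMAS AND PROOFS =====

-- the number of elements of A with bit i set (the quantity both programs count)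
def pvCnt (A : List Int) (i : Nat) : Int :=
  (A.countP (fun x => decide (0 < PySem.Int.band x ((1:Int) <<< i))) : Int)

theorem pvCnt_nonneg (A : List Int) (i : Nat) : 0 ≤ pvCnt A i := by
  unfold pvCnt; positivity

theorem pvCnt_cons (a : Int) (l : List Int) (i : Nat) :
    pvCnt (a :: l) i = (if 0 < PySem.Int.band a ((1:Int) <<< i) then 1 else 0) + pvCnt l i := by
  unfold pvCnt
  rw [List.countP_cons]
  by_cases h : 0 < PySem.Int.band a ((1:Int) <<< i)
  · simp [h]; omega
  · simp [h]

-- A's inner loop computes: 'i' as soon as the running count reaches 4, else leaves idx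
theorem pvInnerA_spec (i : Nat) (idx : Int) :
    ∀ (l : List Int) (c : Int), c < 4 →
      pvInnerA i idx l c = if 4 ≤ c + pvCnt l i then (i : Int) else idx := by
  intro l
  induction l with
  | nil =>
    intro c hc
    simp only [pvInnerA, pvCnt, List.countP_nil, Nat.cast_zero, add_zero]
    rw [if_neg (by omega)]
  | cons a rest ih =>
    intro c hc
    rw [pvInnerA, pvCnt_cons]
    have hnn := pvCnt_nonneg rest i
    by_cases hb : 0 < PySem.Int.band a ((1:Int) <<< i)
    · simp only [hb, if_true]
      by_cases h4 : 4 ≤ c + 1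
      · rw [if_pos h4, if_pos (by omega)]
      · rw [if_neg h4, ih (c + 1) (by omega), add_assoc]
    · simp only [hb, if_false]
      rw [if_neg (by omega), ih c hc, zero_add]

theorem pvFoldrFind (q : Nat → Bool) :
    ∀ (l : List Nat) (init : Int),
      l.foldr (fun i idx => if q i then (i : Int) else idx) init
        = (match l.find? q with | some i => (i : Int) | none => init) := by
  intro l
  induction l with
  | nil => intro init; simp
  | cons a rest ih =>
    intro init
    rw [List.foldr_cons, ih, List.find?_cons]
    by_cases h : q a <;> simp [h]

-- A's outer loop: descending with last-write-wins = the LOWEST bit i with pvCnt A i ≥ 4 (else -1)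
theorem pvOuter_eq (A : List Int) :
    ((List.range 31).reverse).foldl (fun idx i => pvInnerA i idx A 0) (-1)
      = (match (List.range 31).find? (fun i => decide (4 ≤ pvCnt A i)) with
         | some i => (i : Int) | none => -1) := by
  rw [List.foldl_reverse]
  have hf : (fun (i : Nat) (idx : Int) => pvInnerA i idx A 0)
      = (fun i idx => if (fun j => decide (4 ≤ pvCnt A j)) i then (i : Int) else idx) := by
    funext i idx
    rw [pvInnerA_spec i idx A 0 (by norm_num), zero_add]
    simp
  rw [hf, pvFoldrFind]

-- the histogram step for one element touches exactly the bits set in x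
theorem pvStep_length (x : Int) (l : List Nat) (cs : List Int) :
    (l.foldl (fun (cs : List Int) (i : Nat) =>
      if 0 < PySem.Int.band x ((1:Int) <<< i) then cs.set i (cs.getD i 0 + 1) else cs) cs).length
      = cs.length := by
  induction l generalizing cs with
  | nil => rfl
  | cons a rest ih =>
    rw [List.foldl_cons]
    by_cases h : 0 < PySem.Int.band x ((1:Int) <<< a)
    · rw [if_pos h, ih, List.length_set]
    · rw [if_neg h, ih]

theorem pvStep_getD (x : Int) (l : List Nat) (cs : List Int) (j : Nat)
    (hj : j < cs.length) (hnd : l.Nodup) :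
    (l.foldl (fun (cs : List Int) (i : Nat) =>
      if 0 < PySem.Int.band x ((1:Int) <<< i) then cs.set i (cs.getD i 0 + 1) else cs) cs).getD j 0
      = cs.getD j 0 + (if j ∈ l ∧ 0 < PySem.Int.band x ((1:Int) <<< j) then 1 else 0) := by
  induction l generalizing cs with
  | nil => simp
  | cons a rest ih =>
    rw [List.foldl_cons]
    rcases List.nodup_cons.mp hnd with ⟨ha, hrest⟩
    by_cases hja : j = a
    · subst hja
      by_cases h : 0 < PySem.Int.band x ((1:Int) <<< j)
      · rw [if_pos h, ih _ (by rw [List.length_set]; exact hj) hrest,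
          if_neg (by simp [ha])]
        have hself : (cs.set j (cs.getD j 0 + 1)).getD j 0 = cs.getD j 0 + 1 := by
          simp [List.getD, hj]
        rw [hself, if_pos ⟨by simp, h⟩]
        ring
      · rw [if_neg h, ih _ hj hrest, if_neg (by simp [ha]),
          if_neg (by simp [h])]
    · have hset : ∀ v, (cs.set a v).getD j 0 = cs.getD j 0 := by
        intro v
        rcases Nat.lt_or_ge a cs.length with hal | hal
        · simp [List.getD, List.getElem?_set_ne (show a ≠ j by omega)]
        · rw [List.set_eq_of_length_le (by omega)]
      by_cases h : 0 < PySem.Int.band x ((1:Int) <<< a)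
      · rw [if_pos h, ih _ (by rw [List.length_set]; exact hj) hrest, hset]
        simp [hja]
      · rw [if_neg h, ih _ hj hrest]
        simp [hja]

-- the histogram is the per-bit count
theorem pvCountsB_getD (A : List Int) (j : Nat) (hj : j < 31) :
    (pvCountsB A).getD j 0 = pvCnt A j := by
  unfold pvCountsB
  have main : ∀ (l : List Int) (cs : List Int), cs.length = 31 →
      (l.foldl (fun counts x =>
        (List.range 31).foldl (fun (cs : List Int) (i : Nat) =>
          if 0 < PySem.Int.band x ((1:Int) <<< i) then cs.set i (cs.getD i 0 + 1) else cs) counts) cs).getD j 0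
        = cs.getD j 0 + pvCnt l j := by
    intro l
    induction l with
    | nil => intro cs _; simp [pvCnt]
    | cons a rest ih =>
      intro cs hcs
      rw [List.foldl_cons, ih _ (by rw [pvStep_length]; exact hcs),
        pvStep_getD a (List.range 31) cs j (by omega) (List.nodup_range),
        pvCnt_cons]
      have hm : j ∈ List.range 31 := List.mem_range.mpr hj
      by_cases h : 0 < PySem.Int.band a ((1:Int) <<< j)
      · rw [if_pos ⟨hm, h⟩, if_pos h]; ring
      · rw [if_neg (by tauto), if_neg h]
        ring
  rw [main A _ (by simp)]
  have h0 : (List.replicate 31 (0:Int)).getD j 0 = 0 := by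
    rw [List.getD_eq_getElem?_getD, List.getElem?_replicate]
    split <;> rfl
  rw [h0, zero_add]

-- B's index scan with break = the same first-match search
theorem pvFindIdxB_eq (counts : List Int) :
    ∀ (l : List Nat),
      pvFindIdxB counts l
        = (match l.find? (fun i => decide (4 ≤ counts.getD i 0)) with
           | some i => (i : Int) | none => -1) := by
  intro l
  induction l with
  | nil => simp [pvFindIdxB]
  | cons a rest ih =>
    rw [pvFindIdxB, List.find?_cons]
    by_cases h : (4:Int) ≤ counts[a]?.getD 0 <;>
      simp [List.getD_eq_getElem?_getD, h, ih]

theorem pvFind_congr (p q : Nat → Bool) :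
    ∀ (l : List Nat), (∀ i ∈ l, p i = q i) → l.find? p = l.find? q := by
  intro l
  induction l with
  | nil => intro _; rfl
  | cons a rest ih =>
    intro h
    rw [List.find?_cons, List.find?_cons, h a (by simp)]
    by_cases hq : q a <;> simp [hq, ih (fun i hi => h i (by simp [hi]))]

-- ===== VERDICT (by name: the statement is the Claim_ definition above) =====
theorem MaximumSatisfaction_spec : Claim_equal_MaximumSatisfaction := by
  intro A _hDom _hPre
  show MaximumSatisfaction A = MaximumSatisfaction_alt A
  unfold MaximumSatisfaction MaximumSatisfaction_alt
  rw [pvOuter_eq, pvFindIdxB_eq,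
    pvFind_congr (fun i => decide (4 ≤ pvCnt A i))
      (fun i => decide (4 ≤ (pvCountsB A).getD i 0))
      (List.range 31)
      (fun i hi => by
        simp only []
        rw [pvCountsB_getD A i (List.mem_range.mp hi)])]
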